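-- pv_equiv track=rewrite | github.com/lu-group/noem | ex4/ex4_4/main.py | get_oneBC_nodeid
-- ===== SOURCE A (Python) =====
-- def get_oneBC_nodeid(num_x, num_y):
--     start_interval = int(0.5 / 2 * num_x)
--     mesh_size = int(num_x / 2.0)
--     left_nodeid = [(i + start_interval) * (num_x + 1) + start_interval for i in range(int(mesh_size * 1 + 1))]
--     right_nodeid = [(i + start_interval) * (num_x + 1) + (num_y - start_interval) for i in range(int(mesh_size * 1 + 1))]
--     top_nodeid = [i + start_interval + (num_x + 1) * (num_y - start_interval) for i in range(int(mesh_size * 1 + 1))]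
--     bottom_nodeid = [i + start_interval + (num_x + 1) * start_interval for i in range(int(mesh_size * 1 + 1))]
--     ToneBC_nodeid = bottom_nodeid + right_nodeid[1::] + top_nodeid[-2::-1] + left_nodeid[-2::-1]
--     ToneBC_nodeid = ToneBC_nodeid[:-1]
--     return ToneBC_nodeid
-- ===== SOURCE B (Python) =====
-- def get_oneBC_nodeid(num_x, num_y):
--     # One pass around the closed boundary square: a single perimeter index t
--     # is decoded into (row, col) and mapped through nodeid(r, c) = r*(num_x+1) + c.
--     s = int(0.5 / 2 * num_x)          # boundary offset (corner row/col)
--     m = int(num_x / 2.0)              # edge length in intervals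
--     n = num_x + 1
--     out = []
--     for t in range(4 * m):
--         if t <= m:                    # bottom edge, left -> right
--             r, c = s, s + t
--         elif t <= 2 * m:              # right edge, bottom -> top
--             r, c = s + (t - m), num_y - s
--         elif t <= 3 * m:              # top edge, right -> left
--             r, c = num_y - s, s + (3 * m - t)
--         else:                         # left edge, top -> bottom (closing node dropped)
--             r, c = s + (4 * m - t), s
--         out.append(r * n + c)
--     return out
-- ===== Notes on version B (the rewrite author's own statement) =====
-- stated objective: simpler
-- what changed: A builds four edge lists, slices/reverses/concatenates them and trims the closing node; B emits the perimeter in one pass by decoding a single perimeter index into (row, col) and applying nodeid(r,c) = r*(num_x+1)+c, with no intermediate lists or slicing.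
import Mathlib
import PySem

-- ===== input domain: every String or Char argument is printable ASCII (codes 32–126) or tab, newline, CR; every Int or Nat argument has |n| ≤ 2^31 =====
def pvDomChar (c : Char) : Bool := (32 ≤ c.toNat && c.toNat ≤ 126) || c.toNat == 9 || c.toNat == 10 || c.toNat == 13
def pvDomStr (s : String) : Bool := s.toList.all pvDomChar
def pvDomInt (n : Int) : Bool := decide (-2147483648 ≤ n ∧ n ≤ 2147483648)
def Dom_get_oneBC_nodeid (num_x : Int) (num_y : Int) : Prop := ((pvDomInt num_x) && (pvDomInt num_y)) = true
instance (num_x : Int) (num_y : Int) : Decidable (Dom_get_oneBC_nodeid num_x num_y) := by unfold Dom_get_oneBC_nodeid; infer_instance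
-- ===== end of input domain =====

-- B replaces A's four edge lists + slice/reverse/concatenate/trim with a single pass over one
-- perimeter index decoded into (row, col);  objective: simpler (one loop, no intermediate lists).

-- ===== PORT A =====
-- int(0.5 / 2 * num_x) = int(0.25 * num_x) and int(num_x / 2.0): both float products/quotients are
-- exact for |num_x| ≤ 2^31, and int() truncates toward zero = PySem.Int.truncdiv (exact there).
def get_oneBC_nodeid (num_x : Int) (num_y : Int) : List Int :=
  let start_interval := PySem.Int.truncdiv num_x 4
  let mesh_size := PySem.Int.truncdiv num_x 2
  let left_nodeid := (PySem.List.pyRange 0 (mesh_size * 1 + 1) 1).map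
    (fun i => (i + start_interval) * (num_x + 1) + start_interval)
  let right_nodeid := (PySem.List.pyRange 0 (mesh_size * 1 + 1) 1).map
    (fun i => (i + start_interval) * (num_x + 1) + (num_y - start_interval))
  let top_nodeid := (PySem.List.pyRange 0 (mesh_size * 1 + 1) 1).map
    (fun i => i + start_interval + (num_x + 1) * (num_y - start_interval))
  let bottom_nodeid := (PySem.List.pyRange 0 (mesh_size * 1 + 1) 1).map
    (fun i => i + start_interval + (num_x + 1) * start_interval)
  -- xs[1::] ; xs[-2::-1] (step -1 slice; the literal step is -1 ≠ 0, so slice? is always `some`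
  -- and .getD [] is never the default) ; finally xs[:-1]
  let t := bottom_nodeid ++ PySem.List.slice right_nodeid (some 1) none ++
    (PySem.List.slice? top_nodeid (some (-2)) none (-1)).getD [] ++
    (PySem.List.slice? left_nodeid (some (-2)) none (-1)).getD []
  PySem.List.slice t none (some (-1))

-- ===== PORT B =====
def get_oneBC_nodeid_alt (num_x : Int) (num_y : Int) : List Int :=
  let s := PySem.Int.truncdiv num_x 4
  let m := PySem.Int.truncdiv num_x 2
  let n := num_x + 1
  (PySem.List.pyRange 0 (4 * m) 1).map (fun t =>
    if t ≤ m then s * n + (s + t)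
    else if t ≤ 2 * m then (s + (t - m)) * n + (num_y - s)
    else if t ≤ 3 * m then (num_y - s) * n + (s + (3 * m - t))
    else (s + (4 * m - t)) * n + s)

-- ===== PRECONDITION & SPEC =====
def Spec_get_oneBC_nodeid (num_x : Int) (num_y : Int) (out : List Int) : Prop := out = get_oneBC_nodeid_alt num_x num_y
instance (num_x : Int) (num_y : Int) (out : List Int) : Decidable (Spec_get_oneBC_nodeid num_x num_y out) := by unfold Spec_get_oneBC_nodeid; infer_instance

-- ===== CLAIM (what is proved, stated in full; the proofs are below) =====
def Claim_equal_get_oneBC_nodeid : Prop := ∀ (num_x : Int) (num_y : Int), Dom_get_oneBC_nodeid num_x num_y → Spec_get_oneBC_nodeid num_x num_y (get_oneBC_nodeid num_x num_y)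

-- ===== LEMMAS AND PROOFS =====

-- xs[-2::-1] of an (n+1)-element comprehension is the reversed comprehension without its last entry.
theorem slice_neg2_rev_map {α : Type} (f : Nat → α) (n : Nat) :
    (PySem.List.slice? ((List.range (n+1)).map f) (some (-2)) none (-1)).getD []
      = List.map (fun k => f (n - 1 - k)) (List.range n) := by
  simp only [PySem.List.slice?, PySem.List.sliceIndices]
  norm_num
  rcases Nat.eq_zero_or_pos n with hn | hn
  · subst hn; simp
  · rw [if_pos hn, show ((-2:Int) + (↑n + 1) + 1).toNat = n by omega,
       ← List.filterMap_eq_map]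
    apply List.filterMap_congr
    intro x hx
    rw [List.mem_range] at hx
    rw [show ((-2:Int) + (↑n + 1) + -↑x).toNat = n - 1 - x by omega]
    rw [List.getElem?_range (by omega)]
    rfl

theorem map_range_dropLast {α : Type} (g : Nat → α) (q : Nat) :
    (List.map g (List.range (q+1))).dropLast = List.map g (List.range q) := by
  simp [List.range_succ]

-- The heart of the equivalence, for arbitrary s (= start_interval) and m (= mesh_size).
theorem key (nx ny s m : Int) :
  PySem.List.slice (
    ((PySem.List.pyRange 0 (m*1+1) 1).map (fun i => i + s + (nx+1)*s)) ++
    PySem.List.slice ((PySem.List.pyRange 0 (m*1+1) 1).map (fun i => (i+s)*(nx+1)+(ny-s))) (some 1) none ++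
    (PySem.List.slice? ((PySem.List.pyRange 0 (m*1+1) 1).map (fun i => i + s + (nx+1)*(ny-s))) (some (-2)) none (-1)).getD [] ++
    (PySem.List.slice? ((PySem.List.pyRange 0 (m*1+1) 1).map (fun i => (i+s)*(nx+1)+s)) (some (-2)) none (-1)).getD []
  ) none (some (-1))
  = (PySem.List.pyRange 0 (4*m) 1).map (fun t =>
      if t ≤ m then s*(nx+1) + (s+t)
      else if t ≤ 2*m then (s+(t-m))*(nx+1)+(ny-s)
      else if t ≤ 3*m then (ny-s)*(nx+1)+(s+(3*m-t))
      else (s+(4*m-t))*(nx+1)+s) := by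
  simp only [PySem.List.pyRange_one, List.map_map]
  rcases lt_trichotomy m 0 with hm | hm | hm
  · rw [show (m*1+1-0).toNat = 0 by omega, show (4*m-0).toNat = 0 by omega]
    norm_num [PySem.List.slice_to_neg_one, PySem.List.slice_from_one,
      PySem.List.slice?, PySem.List.sliceIndices]
  · subst hm
    rw [show ((0:Int)*1+1-0).toNat = 0+1 by norm_num, show ((4*(0:Int))-0).toNat = 0 by norm_num]
    rw [slice_neg2_rev_map, slice_neg2_rev_map, PySem.List.slice_from_one,
        PySem.List.slice_to_neg_one]
    simp
  · lift m to ℕ using (by omega) with n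
    obtain ⟨p, rfl⟩ : ∃ p, n = p + 1 := ⟨n-1, by omega⟩
    rw [show ((↑(p+1):Int)*1+1-0).toNat = (p+1)+1 by omega,
        show ((4*(↑(p+1):Int))-0).toNat = 4*(p+1) by omega]
    rw [slice_neg2_rev_map, slice_neg2_rev_map, PySem.List.slice_from_one,
        PySem.List.slice_to_neg_one]
    rw [List.dropLast_append_of_ne_nil (by simp), map_range_dropLast,
        ← List.map_tail,
        show (List.range (p+1+1)).tail = List.map Nat.succ (List.range (p+1)) by
          rw [List.range_succ_eq_map]; rfl,
        List.map_map]
    conv_rhs => rw [show 4 * (p+1) = (p+1+1) + ((p+1) + ((p+1) + p)) by ring]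
    rw [show List.range ((p+1+1) + ((p+1) + ((p+1) + p))) = List.range (p+1+1) ++ (List.range ((p+1) + ((p+1) + p))).map (fun x => (p+1+1) + x) from List.range_add,
        show List.range ((p+1) + ((p+1) + p)) = List.range (p+1) ++ (List.range ((p+1) + p)).map (fun x => (p+1) + x) from List.range_add,
        show List.range ((p+1) + p) = List.range (p+1) ++ (List.range p).map (fun x => (p+1) + x) from List.range_add]
    simp only [List.map_append, List.map_map, List.append_assoc]
    congr 1
    · apply List.map_congr_left
      intro k hk; simp only [List.mem_range] at hk
      simp only [Function.comp]
      rw [if_pos (by push_cast; omega)]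
      ring
    congr 1
    · apply List.map_congr_left
      intro k hk; simp only [List.mem_range] at hk
      simp only [Function.comp]
      rw [if_neg (by push_cast; omega), if_pos (by push_cast; omega)]
      push_cast; ring
    congr 1
    · apply List.map_congr_left
      intro k hk; simp only [List.mem_range] at hk
      simp only [Function.comp]
      rw [if_neg (by push_cast; omega), if_neg (by push_cast; omega),
          if_pos (by push_cast; omega)]
      rw [show p + 1 - 1 - k = p - k by omega, Nat.cast_sub (by omega)]
      push_cast; ring
    · apply List.map_congr_left
      intro k hk; simp only [List.mem_range] at hk
      simp only [Function.comp]
      rw [if_neg (by push_cast; omega), if_neg (by push_cast; omega),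
          if_neg (by push_cast; omega)]
      rw [show p + 1 - 1 - k = p - k by omega, Nat.cast_sub (by omega)]
      push_cast; ring

-- ===== VERDICT (by name: the statement is the Claim_ definition above) =====
theorem get_oneBC_nodeid_spec : Claim_equal_get_oneBC_nodeid := by
  intro num_x num_y _
  unfold Spec_get_oneBC_nodeid get_oneBC_nodeid get_oneBC_nodeid_alt
  exact key num_x num_y (PySem.Int.truncdiv num_x 4) (PySem.Int.truncdiv num_x 2)
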